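-- pv_equiv track=rewrite | github.com/drtail/drtail-prompt | src/drtail_prompt/schema.py | is_valid_semver
-- ===== SOURCE A (Python) =====
-- def is_valid_semver(version: str) -> bool:
--     try:
--         parts = version.split(".")
--         if len(parts) < 2 or len(parts) > 3:
--             return False
--
--         for part in parts:
--             if "+" in part:
--                 part = part.split("+")[0]
--             if "-" in part:
--                 part = part.split("-")[0]
--
--             if not part.isdigit() or int(part) < 0:
--                 return False
--
--         return True
--     except Exception:
--         return False
-- ===== SOURCE B (Python) =====
-- def is_valid_semver(version: str) -> bool:
--     # single left-to-right character scan; no splitting, no substring allocation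
--     if not isinstance(version, str):
--         return False
--     dots = 0          # number of '.' seen so far
--     have_digit = False  # current part has a digit prefix so far (and nothing illegal)
--     in_tail = False   # we are past a '+'/'-' in the current part: rest ignored up to '.'
--     for ch in version:
--         if ch == '.':
--             if not have_digit:
--                 return False
--             dots += 1
--             have_digit = False
--             in_tail = False
--         elif in_tail:
--             continue
--         elif ch.isdigit():
--             have_digit = True
--         elif ch == '+' or ch == '-':
--             if not have_digit:
--                 return False
--             in_tail = True
--         else:
--             return False
--     return have_digit and dots in (1, 2)
-- ===== Notes on version B (the rewrite author's own statement) =====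
-- stated objective: simpler
-- what changed: A splits the string at dots, then for each part re-splits at plus/minus signs and calls isdigit and int; B is a single left-to-right character scan with three state variables (dot count, digit-seen, in-ignored-tail) that never builds intermediate part lists.
import Mathlib
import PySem

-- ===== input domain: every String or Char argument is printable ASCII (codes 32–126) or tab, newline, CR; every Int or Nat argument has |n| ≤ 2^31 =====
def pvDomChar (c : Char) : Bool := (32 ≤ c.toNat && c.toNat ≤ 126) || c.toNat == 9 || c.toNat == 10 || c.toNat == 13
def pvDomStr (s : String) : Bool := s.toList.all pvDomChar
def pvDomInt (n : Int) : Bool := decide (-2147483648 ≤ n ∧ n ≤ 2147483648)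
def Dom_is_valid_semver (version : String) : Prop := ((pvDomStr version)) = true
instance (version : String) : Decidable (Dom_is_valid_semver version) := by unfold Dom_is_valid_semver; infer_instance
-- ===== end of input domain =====

-- B replaces A's split-into-parts-then-loop by a single left-to-right character scan
-- (simpler: no intermediate part lists); equivalence is proved for every string.

-- ===== PORT A =====
-- int(part) in A is evaluated only after part.isdigit() is true, i.e. part is a nonempty run of
-- ASCII digits; on exactly those strings int(part) equals this decimal fold (no sign, space or
-- underscore can occur there), so this hand port of int() is exact where A reaches it.
def pyIntOfDigits (cs : List Char) : Int :=
  cs.foldl (fun a c => a * 10 + ((c.toNat : Int) - 48)) 0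

-- body of A's for-loop for one part ('part.split(sep)[0]' is '.headD []': a split result is
-- never empty, so the [0] never raises)
def checkPartA (part : List Char) : Bool :=
  let part1 := if PySem.Chars.isIn ['+'] part then (PySem.Chars.splitOn part ['+']).headD [] else part
  let part2 := if PySem.Chars.isIn ['-'] part1 then (PySem.Chars.splitOn part1 ['-']).headD [] else part1
  if !PySem.Chars.strIsdigit part2 then false
  else if pyIntOfDigits part2 < 0 then false
  else true

def aLoop : List (List Char) → Bool
  | [] => true
  | p :: ps => if checkPartA p then aLoop ps else false

def is_valid_semver (version : String) : Bool :=
  let parts := PySem.Chars.splitOn version.toList ['.']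
  if parts.length < 2 || parts.length > 3 then false
  else aLoop parts

-- ===== PORT B =====
def altLoop : List Char → Nat → Bool → Bool → Bool
  | [], dots, haveDigit, _ => haveDigit && (dots == 1 || dots == 2)
  | c :: rest, dots, haveDigit, inTail =>
    if c = '.' then
      if haveDigit then altLoop rest (dots + 1) false false else false
    else if inTail then altLoop rest dots haveDigit inTail
    else if PySem.Chars.isdigit c then altLoop rest dots true inTail
    else if c = '+' || c = '-' then
      if haveDigit then altLoop rest dots haveDigit true else false
    else false

def is_valid_semver_alt (version : String) : Bool :=
  altLoop version.toList 0 false false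

-- ===== PRECONDITION & SPEC =====
def Spec_is_valid_semver (version : String) (out : Bool) : Prop := out = is_valid_semver_alt version
instance (version : String) (out : Bool) : Decidable (Spec_is_valid_semver version out) := by unfold Spec_is_valid_semver; infer_instance

-- ===== CLAIM (what is proved, stated in full; the proofs are below) =====
def Claim_equal_is_valid_semver : Prop := ∀ (version : String), Dom_is_valid_semver version → Spec_is_valid_semver version (is_valid_semver version)

-- ===== LEMMAS AND PROOFS =====

def msp (sep : Char) : List Char → List (List Char)
  | [] => [[]]
  | c :: r =>
    if c = sep then [] :: msp sep r
    else match msp sep r with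
         | [] => [[c]]
         | h :: t => (c :: h) :: t
def consHead (xs : List Char) : List (List Char) → List (List Char)
  | [] => [xs]
  | h :: t => (xs ++ h) :: t
theorem msp_ne_nil (sep : Char) (l : List Char) : msp sep l ≠ [] := by
  cases l with
  | nil => simp [msp]
  | cons c r =>
    simp only [msp]
    split_ifs
    · simp
    · cases msp sep r <;> simp
theorem go_eq (sep : Char) : ∀ (fuel : Nat) (l cur : List Char) (acc : List (List Char)),
    l.length ≤ fuel →
    PySem.Chars.splitOn.go [sep] fuel l cur acc =
      acc.reverse ++ consHead cur.reverse (msp sep l) := by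
  intro fuel
  induction fuel with
  | zero =>
    intro l cur acc hl
    have : l = [] := List.eq_nil_of_length_eq_zero (Nat.le_zero.mp hl)
    subst this
    simp [PySem.Chars.splitOn.go, msp, consHead]
  | succ n ih =>
    intro l cur acc hl
    cases l with
    | nil => simp [PySem.Chars.splitOn.go, msp, consHead]
    | cons c rest =>
      rw [PySem.Chars.splitOn.go]
      simp only [List.length_cons, Nat.add_le_add_iff_right] at hl
      by_cases hc : c = sep
      · subst hc
        have hpre : [c].isPrefixOf (c :: rest) = true := by
          simp [List.isPrefixOf]
        rw [if_pos hpre]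
        simp only [List.length_singleton, List.drop_one, List.tail_cons]
        rw [ih rest [] (cur.reverse :: acc) hl]
        rcases hm : msp c rest with _ | ⟨h, t⟩
        · exact absurd hm (msp_ne_nil c rest)
        · simp [msp, consHead, hm]
      · have hpre : [sep].isPrefixOf (c :: rest) = false := by
          simp [List.isPrefixOf]
          intro h; exact absurd h.symm hc
        rw [if_neg (by simp [hpre])]
        rw [ih rest (c :: cur) acc hl]
        rcases hm : msp sep rest with _ | ⟨h, t⟩
        · exact absurd hm (msp_ne_nil sep rest)
        · simp [msp, consHead, hm, hc]
theorem splitOn_eq_msp (sep : Char) (l : List Char) :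
    PySem.Chars.splitOn l [sep] = msp sep l := by
  rw [PySem.Chars.splitOn, go_eq sep (l.length + 1) l [] [] (Nat.le_succ _)]
  rcases hm : msp sep l with _ | ⟨h, t⟩
  · exact absurd hm (msp_ne_nil sep l)
  · simp [consHead]
theorem msp_length (sep : Char) (l : List Char) :
    (msp sep l).length = l.countP (· == sep) + 1 := by
  induction l with
  | nil => simp [msp]
  | cons c r ih =>
    simp only [msp, List.countP_cons]
    by_cases hc : c = sep
    · simp [hc, ih]
    · rcases hm : msp sep r with _ | ⟨h, t⟩
      · exact absurd hm (msp_ne_nil sep r)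
      · simp only [if_neg hc, hm]
        rw [hm] at ih
        simp at ih ⊢
        simp [beq_iff_eq, hc, ih]
theorem msp_headD (sep : Char) (l : List Char) :
    (msp sep l).headD [] = l.takeWhile (fun c => !(c == sep)) := by
  induction l with
  | nil => simp [msp]
  | cons c r ih =>
    simp only [msp, List.takeWhile]
    by_cases hc : c = sep
    · simp [hc]
    · rcases hm : msp sep r with _ | ⟨h, t⟩
      · exact absurd hm (msp_ne_nil sep r)
      · rw [hm] at ih
        have hb : (!c == sep) = true := by simp [hc]
        simp [hc, hb, ← ih]
theorem branch_takeWhile (sep : Char) (p : List Char) :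
    (if PySem.Chars.isIn [sep] p then (PySem.Chars.splitOn p [sep]).headD [] else p) =
      p.takeWhile (fun c => !(c == sep)) := by
  by_cases hmem : sep ∈ p
  · rw [if_pos, splitOn_eq_msp, msp_headD]
    rw [PySem.Chars.isIn_iff_infix]
    exact (List.singleton_infix_iff sep p).mpr hmem
  · rw [if_neg, List.takeWhile_eq_self_iff.mpr]
    · intro c hc
      simp only [Bool.not_eq_eq_eq_not, Bool.not_true, beq_eq_false_iff_ne, ne_eq]
      intro h; exact hmem (h ▸ hc)
    · rw [PySem.Chars.isIn_iff_infix, List.singleton_infix_iff]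
      exact hmem
theorem pyIntOfDigits_nonneg (cs : List Char) (h : ∀ c ∈ cs, PySem.Chars.isdigit c = true) :
    0 ≤ pyIntOfDigits cs := by
  unfold pyIntOfDigits
  suffices H : ∀ a : Int, 0 ≤ a → 0 ≤ cs.foldl (fun a c => a * 10 + ((c.toNat : Int) - 48)) a by
    exact H 0 le_rfl
  induction cs with
  | nil => intro a ha; simpa using ha
  | cons c r ih =>
    intro a ha
    simp only [List.foldl_cons]
    have hc := h c (by simp)
    have h48 : (48 : Int) ≤ c.toNat := by
      simp only [PySem.Chars.isdigit, Bool.and_eq_true, decide_eq_true_eq] at hc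
      have := hc.1
      simp [Char.le_def] at this
      exact_mod_cast this
    exact ih (fun c hc' => h c (by simp [hc'])) _ (by omega)
theorem tw2 (p : List Char) :
    (p.takeWhile (fun c => !(c == '+'))).takeWhile (fun c => !(c == '-')) =
      p.takeWhile (fun c => !(c == '+') && !(c == '-')) := by
  induction p with
  | nil => simp
  | cons c r ih =>
    by_cases h1 : c = '+'
    · simp [List.takeWhile, h1]
    · by_cases h2 : c = '-'
      · simp [List.takeWhile, h1, h2]
      · have b1 : (c == '+') = false := by simp [h1]
        have b2 : (c == '-') = false := by simp [h2]
        simp [List.takeWhile, b1, b2, ih]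

theorem ifdigits (q : List Char) :
    (if !PySem.Chars.strIsdigit q then false
     else if pyIntOfDigits q < 0 then false else true) = PySem.Chars.strIsdigit q := by
  by_cases hd : PySem.Chars.strIsdigit q = true
  · have hall : ∀ c ∈ q, PySem.Chars.isdigit c = true := by
      simp only [PySem.Chars.strIsdigit, Bool.and_eq_true, List.all_eq_true] at hd
      exact hd.2
    simp [hd, not_lt.mpr (pyIntOfDigits_nonneg q hall)]
  · simp only [Bool.not_eq_true] at hd
    simp [hd]

theorem checkPartA_eq (p : List Char) :
    checkPartA p =
      PySem.Chars.strIsdigit (p.takeWhile (fun c => !(c == '+') && !(c == '-'))) := by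
  unfold checkPartA
  simp only [branch_takeWhile]
  rw [tw2]
  exact ifdigits _
def scanPart : Bool → Bool → List Char → Option Bool
  | hd, _, [] => some hd
  | hd, it, c :: r =>
    if it then scanPart hd it r
    else if PySem.Chars.isdigit c then scanPart true it r
    else if c = '+' || c = '-' then (if hd then scanPart hd true r else none)
    else none
def partB (p : List Char) : Bool :=
  match scanPart false false p with
  | some h => h
  | none => false
def allOK : Bool → Bool → List (List Char) → Bool
  | hd, _, [] => hd
  | hd, it, p :: ps =>
    match scanPart hd it p with
    | none => false
    | some h => match ps with
      | [] => h
      | _ :: _ => h && allOK false false ps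

theorem isdigit_plus : PySem.Chars.isdigit '+' = false := by decide
theorem isdigit_minus : PySem.Chars.isdigit '-' = false := by decide

theorem scanPart_tail (p : List Char) (hd : Bool) : scanPart hd true p = some hd := by
  induction p with
  | nil => rfl
  | cons c r ih => simp [scanPart, ih]

theorem digit_ne_pm (c : Char) (h : PySem.Chars.isdigit c = true) : (c == '+') = false ∧ (c == '-') = false := by
  simp only [PySem.Chars.isdigit, Bool.and_eq_true, decide_eq_true_eq] at h
  constructor <;> · simp only [beq_eq_false_iff_ne, ne_eq]; rintro rfl; revert h; decide

theorem scanPart_digits (p : List Char) :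
    scanPart true false p =
      if (p.takeWhile (fun c => !(c == '+') && !(c == '-'))).all PySem.Chars.isdigit then some true
      else none := by
  induction p with
  | nil => simp [scanPart]
  | cons c r ih =>
    by_cases hdig : PySem.Chars.isdigit c = true
    · obtain ⟨b1, b2⟩ := digit_ne_pm c hdig
      simp [scanPart, hdig, ih, List.takeWhile, b1, b2]
    · by_cases hpm : c = '+' ∨ c = '-'
      · have hb : (c = '+' || c = '-') = true := by
          rcases hpm with h | h <;> simp [h]
        have htw : (c == '+') = true ∨ (c == '-') = true := by
          rcases hpm with h | h <;> simp [h]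
        simp only [Bool.not_eq_true] at hdig
        rcases hpm with h | h <;>
          simp [scanPart, hdig, h, scanPart_tail, List.takeWhile, isdigit_plus, isdigit_minus]
      · push_neg at hpm
        have hb : (c = '+' || c = '-') = false := by
          simp [hpm.1, hpm.2]
        have b1 : (c == '+') = false := by simp [hpm.1]
        have b2 : (c == '-') = false := by simp [hpm.2]
        simp only [Bool.not_eq_true] at hdig
        simp [scanPart, hdig, hb, List.takeWhile, b1, b2]

theorem partB_eq (p : List Char) :
    partB p = PySem.Chars.strIsdigit (p.takeWhile (fun c => !(c == '+') && !(c == '-'))) := by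
  cases p with
  | nil => rfl
  | cons c r =>
    by_cases hdig : PySem.Chars.isdigit c = true
    · obtain ⟨b1, b2⟩ := digit_ne_pm c hdig
      unfold partB
      simp only [scanPart, if_neg (by simp : ¬(false = true)), hdig, if_pos rfl, scanPart_digits]
      by_cases hall : ((r.takeWhile (fun c => !(c == '+') && !(c == '-'))).all PySem.Chars.isdigit) = true
      · simp [hall, List.takeWhile, b1, b2, PySem.Chars.strIsdigit, hdig]
      · simp only [Bool.not_eq_true] at hall
        simp [hall, List.takeWhile, b1, b2, PySem.Chars.strIsdigit, hdig]
    · by_cases hpm : c = '+' ∨ c = '-'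
      · have hdig' := hdig
        simp only [Bool.not_eq_true] at hdig'
        unfold partB
        rcases hpm with h | h <;>
          simp [scanPart, hdig', h, List.takeWhile, PySem.Chars.strIsdigit, isdigit_plus, isdigit_minus]
      · push_neg at hpm
        have hb : (c = '+' || c = '-') = false := by simp [hpm.1, hpm.2]
        have b1 : (c == '+') = false := by simp [hpm.1]
        have b2 : (c == '-') = false := by simp [hpm.2]
        have hdig' := hdig
        simp only [Bool.not_eq_true] at hdig'
        unfold partB
        simp [scanPart, hdig', hb, List.takeWhile, b1, b2, PySem.Chars.strIsdigit]

theorem altLoop_eq (l : List Char) : ∀ (dots : Nat) (hd it : Bool),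
    altLoop l dots hd it =
      (allOK hd it (msp '.' l) &&
        ((dots + l.countP (· == '.') == 1) || (dots + l.countP (· == '.') == 2))) := by
  induction l with
  | nil => intro dots hd it; simp [altLoop, msp, allOK, scanPart]
  | cons c r ih =>
    intro dots hd it
    rcases hm : msp '.' r with _ | ⟨h, t⟩
    · exact absurd hm (msp_ne_nil '.' r)
    · by_cases hc : c = '.'
      · subst hc
        simp only [altLoop, if_pos rfl, msp, hm, List.countP_cons, if_pos rfl]
        cases hd with
        | false => simp [allOK, scanPart]
        | true =>
          simp only [if_pos rfl]
          rw [ih (dots + 1) false false, hm]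
          have : dots + 1 + r.countP (· == '.') = dots + (r.countP (· == '.') + 1) := by omega
          simp [allOK, scanPart, this]
      · have hcb : (c == '.') = false := by simp [hc]
        -- head of msp ('.') (c :: r) when c ≠ '.'
        have hmsp : msp '.' (c :: r) = (c :: h) :: t := by simp [msp, hc, hm]
        rw [hmsp]
        simp only [List.countP_cons, hcb, if_neg (by simp [hc] : ¬(c == '.') = true)]
        cases it with
        | true =>
          simp only [altLoop, if_neg hc, if_pos rfl]
          rw [ih dots hd true, hm]
          simp only [allOK, scanPart]
          rfl
        | false =>
          by_cases hdig : PySem.Chars.isdigit c = true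
          · simp only [altLoop, if_neg hc, Bool.false_eq_true, if_false, hdig]
            rw [ih dots true false, hm]
            simp only [allOK, scanPart, hdig]
            simp
          · by_cases hpm : c = '+' ∨ c = '-'
            · have hb : (c = '+' || c = '-') = true := by
                rcases hpm with h' | h' <;> simp [h']
              simp only [Bool.not_eq_true] at hdig
              cases hd with
              | false =>
                simp only [altLoop, if_neg hc, Bool.false_eq_true, if_false, hdig, hb]
                simp [allOK, scanPart, hdig, hb]
              | true =>
                simp only [altLoop, if_neg hc, Bool.false_eq_true, if_false, hdig, hb]
                rw [ih dots true true, hm]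
                simp [allOK, scanPart, hdig, hb, scanPart_tail]
            · push_neg at hpm
              have hb : (c = '+' || c = '-') = false := by simp [hpm.1, hpm.2]
              simp only [Bool.not_eq_true] at hdig
              simp [altLoop, hc, hdig, hb, allOK, scanPart]

theorem allOK_cons (p q : List Char) (qs : List (List Char)) :
    allOK false false (p :: q :: qs) = (partB p && allOK false false (q :: qs)) := by
  cases hs : scanPart false false p <;> simp [allOK, partB, hs]

theorem allOK_eq_all (ps : List (List Char)) (hne : ps ≠ []) :
    allOK false false ps = ps.all partB := by
  induction ps with
  | nil => exact absurd rfl hne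
  | cons p ps ih =>
    cases ps with
    | nil =>
      simp only [allOK, List.all_cons, List.all_nil, Bool.and_true, partB]
      cases scanPart false false p <;> rfl
    | cons q qs =>
      rw [allOK_cons, ih (by simp)]
      simp

theorem aLoop_eq_all (ps : List (List Char)) : aLoop ps = ps.all checkPartA := by
  induction ps with
  | nil => rfl
  | cons p ps ih =>
    simp only [aLoop, List.all_cons, ih]
    cases checkPartA p <;> simp

theorem main_thm (version : String) : is_valid_semver version = is_valid_semver_alt version := by
  unfold is_valid_semver is_valid_semver_alt
  rw [altLoop_eq, splitOn_eq_msp]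
  rcases hm : msp '.' version.toList with _ | ⟨h, t⟩
  · exact absurd hm (msp_ne_nil '.' version.toList)
  · have hlen := msp_length '.' version.toList
    rw [hm] at hlen
    set k := version.toList.countP (· == '.') with hk
    by_cases hgood : k = 1 ∨ k = 2
    · have hc1 : (decide ((h :: t).length < 2) || decide ((h :: t).length > 3)) = false := by
        rw [hlen]; rcases hgood with h' | h' <;> simp [h']
      have hc2 : ((0 + k == 1) || (0 + k == 2)) = true := by
        rcases hgood with h' | h' <;> simp [h']
      simp only [hc1, Bool.false_eq_true, if_false, hc2, Bool.and_true]
      rw [aLoop_eq_all, allOK_eq_all _ (by simp)]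
      congr 1
      funext p
      rw [checkPartA_eq, partB_eq]
    · have hc1 : (decide ((h :: t).length < 2) || decide ((h :: t).length > 3)) = true := by
        rw [hlen]
        have : k = 0 ∨ k ≥ 3 := by omega
        rcases this with h' | h'
        · simp [h']
        · simp; omega
      have hc2 : ((0 + k == 1) || (0 + k == 2)) = false := by
        simp only [Nat.zero_add]
        have h1 : k ≠ 1 := fun h' => hgood (Or.inl h')
        have h2 : k ≠ 2 := fun h' => hgood (Or.inr h')
        simp [h1, h2]
      simp only [hc1, if_true, hc2, Bool.and_false]

-- ===== VERDICT (by name: the statement is the Claim_ definition above) =====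
theorem is_valid_semver_spec : Claim_equal_is_valid_semver := by
  intro version _
  unfold Spec_is_valid_semver
  exact main_thm version
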